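-- pv_equiv track=rewrite | github.com/ifosch/advent-of-code | 2019/1/2.py | fr
-- ===== SOURCE A (Python) =====
-- def fr(i):
--     a = i // 3
--     b = a - 2
--
--     if b > 0:
--         b += fr(b)
--
--     if b < 0:
--         return 0
--
--     return b
-- ===== SOURCE B (Python) =====
-- def fr(i):
--     total = 0
--     x = i
--     while True:
--         f = x // 3 - 2
--         if f <= 0:
--             break
--         total += f
--         x = f
--     return total
-- ===== Notes on version B (the rewrite author's own statement) =====
-- stated objective: alternative
-- what changed: Replaced the linear recursion (with its post-call sign checks) by an explicit iterative while-loop with an accumulator that adds each fuel term until the term drops to zero or below.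
import Mathlib
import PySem

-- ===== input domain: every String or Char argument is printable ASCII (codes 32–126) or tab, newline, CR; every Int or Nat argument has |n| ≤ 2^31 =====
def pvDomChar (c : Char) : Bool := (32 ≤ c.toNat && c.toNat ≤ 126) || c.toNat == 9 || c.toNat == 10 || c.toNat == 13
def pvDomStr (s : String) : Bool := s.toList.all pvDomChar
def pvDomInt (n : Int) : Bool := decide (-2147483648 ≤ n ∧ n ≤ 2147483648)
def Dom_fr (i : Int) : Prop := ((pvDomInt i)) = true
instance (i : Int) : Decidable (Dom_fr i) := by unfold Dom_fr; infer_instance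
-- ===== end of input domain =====

-- B replaces A's linear recursion by an iterative accumulator loop; same values.

-- ===== PORT A =====
-- literal port of A: a = i // 3; b = a - 2; if b > 0: b += fr(b); if b < 0: return 0; return b
def fr (i : Int) : Int :=
  let a := PySem.Int.floordiv i 3
  let b := a - 2
  let b' := if b > 0 then b + fr b else b
  if b' < 0 then 0 else b'
termination_by i.toNat
decreasing_by
  have h3 : PySem.Int.floordiv i 3 = i / 3 := PySem.Int.floordiv_eq_ediv_of_pos (by norm_num)
  omega

-- ===== PORT B =====
-- the while-loop of Source B, state (x, total): f = x // 3 - 2; break when f <= 0, else total += f; x = f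
def frLoop (x : Int) (total : Int) : Int :=
  let f := PySem.Int.floordiv x 3 - 2
  if f ≤ 0 then total else frLoop f (total + f)
termination_by x.toNat
decreasing_by
  have h3 : PySem.Int.floordiv x 3 = x / 3 := PySem.Int.floordiv_eq_ediv_of_pos (by norm_num)
  omega

def fr_alt (i : Int) : Int := frLoop i 0

-- ===== PRECONDITION & SPEC =====
def Spec_fr (i : Int) (out : Int) : Prop := out = fr_alt i
instance (i : Int) (out : Int) : Decidable (Spec_fr i out) := by unfold Spec_fr; infer_instance

-- ===== CLAIM (what is proved, stated in full; the proofs are below) =====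
def Claim_equal_fr : Prop := ∀ (i : Int), Dom_fr i → Spec_fr i (fr i)

-- ===== LEMMAS AND PROOFS =====

theorem fr_nonneg (i : Int) : 0 ≤ fr i := by
  fun_induction fr <;> simp_all

-- A's recursion in single-branch form: with b = i//3 - 2, fr i = (if b ≤ 0 then 0 else b + fr b)
theorem fr_eq (i : Int) :
    fr i = (if PySem.Int.floordiv i 3 - 2 ≤ 0 then 0
            else (PySem.Int.floordiv i 3 - 2) + fr (PySem.Int.floordiv i 3 - 2)) := by
  have h0 := fr_nonneg (PySem.Int.floordiv i 3 - 2)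
  rw [fr]
  split_ifs <;> omega

theorem frLoop_eq (x total : Int) : frLoop x total = total + fr x := by
  fun_induction frLoop with
  | case1 x total f hf =>
    rw [fr_eq, if_pos (show PySem.Int.floordiv x 3 - 2 ≤ 0 from hf)]
    omega
  | case2 x total f hf ih =>
    rw [fr_eq, if_neg (show ¬ PySem.Int.floordiv x 3 - 2 ≤ 0 from hf), ih,
        show f = PySem.Int.floordiv x 3 - 2 from rfl]
    ring

-- ===== VERDICT (by name: the statement is the Claim_ definition above) =====
theorem fr_spec : Claim_equal_fr := by
  intro i _
  unfold Spec_fr fr_alt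
  rw [frLoop_eq]
  omega
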